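-- pv_equiv track=rewrite | github.com/hklie/scrabble | scrabble/chains.py | extract_chains
-- ===== SOURCE A (Python) =====
-- MAX_CHAIN_LEN = 25
--
-- def extract_chains(graph):
--     visited = set()
--     chains = []
--     for node in graph:
--         if node in visited:
--             continue
--         # depth-first search for longest chain from this root
--         stack = [(node, [node])]
--         best_chain = []
--         while stack:
--             curr, path = stack.pop()
--             if len(path) > len(best_chain):
--                 best_chain = path
--             if len(path) >= MAX_CHAIN_LEN:
--                 continue
--             for nbr in graph[curr]:
--                 if nbr not in path:
--                     stack.append((nbr, path + [nbr]))
--         # mark chain nodes visited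
--         for w in best_chain:
--             visited.add(w)
--         chains.append(best_chain)
--     return chains
-- ===== SOURCE B (Python) =====
-- MAX_CHAIN_LEN = 25
--
-- def extract_chains(graph):
--     visited = set()
--     chains = []
--     for node in graph:
--         if node in visited:
--             continue
--         best_chain = []
--
--         def dfs(curr, path):
--             nonlocal best_chain
--             if len(path) > len(best_chain):
--                 best_chain = path
--             if len(path) >= MAX_CHAIN_LEN:
--                 return
--             # reversed() mirrors the LIFO order of the original stack
--             for nbr in reversed(graph[curr]):
--                 if nbr not in path:
--                     dfs(nbr, path + [nbr])
--
--         dfs(node, [node])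
--         for w in best_chain:
--             visited.add(w)
--         chains.append(best_chain)
--     return chains
-- ===== Notes on version B (the rewrite author's own statement) =====
-- stated objective: simpler
-- what changed: Replaces the explicit-stack iterative DFS with a recursive dfs helper that updates the best chain in preorder and iterates neighbors in reversed list order (the stack's LIFO order), keeping the outer root loop and visited marking.
import Mathlib
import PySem

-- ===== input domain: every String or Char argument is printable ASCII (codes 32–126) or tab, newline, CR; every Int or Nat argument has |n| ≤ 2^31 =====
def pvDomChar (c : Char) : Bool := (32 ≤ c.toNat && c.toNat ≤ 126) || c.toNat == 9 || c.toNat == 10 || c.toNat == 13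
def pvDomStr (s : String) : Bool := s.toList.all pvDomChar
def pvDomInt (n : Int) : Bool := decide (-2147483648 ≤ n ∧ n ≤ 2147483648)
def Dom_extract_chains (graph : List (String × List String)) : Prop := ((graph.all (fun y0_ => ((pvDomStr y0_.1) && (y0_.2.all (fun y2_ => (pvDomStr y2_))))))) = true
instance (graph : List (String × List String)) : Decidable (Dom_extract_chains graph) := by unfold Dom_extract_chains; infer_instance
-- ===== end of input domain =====

-- B replaces A's explicit-stack DFS with a recursive dfs helper visiting neighbors in the
-- stack's LIFO order (reversed list order); same return value, no observable mutation.

-- ===== PORT A =====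
-- bound used only by loopA's termination measure: 1 + the longest neighbor list in g
def pvDeg (g : PySem.Dict String (List String)) : Nat :=
  (g.values.map List.length).foldl max 0

theorem pvDeg_getD (g : PySem.Dict String (List String)) (curr : String) :
    (g.getD curr []).length ≤ pvDeg g := by
  rcases h : g.get? curr with _ | v
  · rw [PySem.Dict.getD_of_get?_eq_none _ _ h]; simp
  · rw [PySem.Dict.getD_of_get?_eq_some _ _ h]
    have hv : v ∈ g.values := by
      simp only [PySem.Dict.values]
      exact List.mem_map.mpr ⟨(curr, v), PySem.Dict.mem_items_of_get?_eq_some g h, rfl⟩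
    exact (PySem.List.le_foldl_max _ 0).2 _ (List.mem_map_of_mem hv)

-- the inner 'while stack:' loop of A (head of the list = top of the Python stack)
def loopA (g : PySem.Dict String (List String)) :
    List (String × List String) → List String → List String
  | [], best => best
  | (curr, path) :: stack, best =>
    let best' := if best.length < path.length then path else best
    if 25 ≤ path.length then
      loopA g stack best'
    else
      loopA g ((((g.getD curr []).filter (fun n => !path.contains n)).map
          (fun n => (n, path ++ [n]))).reverse ++ stack) best'
termination_by s _ => (s.map (fun e => (pvDeg g + 1) ^ (25 - e.2.length))).sum
decreasing_by
  · have : 0 < (pvDeg g + 1) ^ (25 - path.length) := Nat.pow_pos (by omega)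
    simp only [List.map_cons, List.sum_cons]
    omega
  · simp only [List.map_cons, List.sum_cons, List.map_append, List.sum_append,
      List.map_reverse, List.sum_reverse, List.map_map]
    rename_i hlt
    have hlen : ((g.getD curr []).filter (fun n => !path.contains n)).length ≤ pvDeg g :=
      le_trans (List.length_filter_le _ _) (pvDeg_getD g curr)
    have hsum : (((g.getD curr []).filter (fun n => !path.contains n)).map
        ((fun e => (pvDeg g + 1) ^ (25 - e.2.length)) ∘ (fun n => (n, path ++ [n])))).sum
        = ((g.getD curr []).filter (fun n => !path.contains n)).length * (pvDeg g + 1) ^ (24 - path.length) := by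
      rw [List.sum_eq_card_nsmul _ ((pvDeg g + 1) ^ (24 - path.length))]
      · simp [List.length_map, mul_comm]
      · intro e he
        rcases List.mem_map.mp he with ⟨n, _, rfl⟩
        simp only [Function.comp, List.length_append, List.length_singleton]
        congr 1
        omega
    rw [hsum]
    have hkey : ((g.getD curr []).filter (fun n => !path.contains n)).length * (pvDeg g + 1) ^ (24 - path.length)
        < (pvDeg g + 1) ^ (25 - path.length) := by
      have h25 : 25 - path.length = (24 - path.length) + 1 := by omega
      rw [h25, pow_succ]
      calc _ ≤ pvDeg g * (pvDeg g + 1) ^ (24 - path.length) :=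
              Nat.mul_le_mul_right _ hlen
        _ < (pvDeg g + 1) ^ (24 - path.length) * (pvDeg g + 1) := by
              have hp : 0 < (pvDeg g + 1) ^ (24 - path.length) := Nat.pow_pos (by omega)
              nlinarith
    omega

-- the outer 'for node in graph:' loop of A
def outerA (g : PySem.Dict String (List String)) :
    List String → PySem.Set String → List (List String) → List (List String)
  | [], _, chains => chains
  | node :: rest, visited, chains =>
    if PySem.Set.contains visited node then outerA g rest visited chains
    else
      let best := loopA g [(node, [node])] []
      outerA g rest (best.foldl (fun s w => PySem.Set.add s w) visited) (chains ++ [best])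

def extract_chains (graph : List (String × List String)) : List (List String) :=
  let g := PySem.Dict.ofList graph
  outerA g g.keys PySem.Set.empty []

-- ===== PORT B =====
-- recursive dfs; the fuel argument only makes the recursion structural: calls start with
-- fuel 25 and every call keeps 25 ≤ fuel + path.length, so the fuel = 0 branch is never taken
def dfsB (g : PySem.Dict String (List String)) :
    Nat → String → List String → List String → List String
  | fuel, curr, path, best =>
    let best' := if best.length < path.length then path else best
    if 25 ≤ path.length then best'
    else
      match fuel with
      | 0 => best'
      | f + 1 =>
        (g.getD curr []).reverse.foldl
          (fun b n => if path.contains n then b else dfsB g f n (path ++ [n]) b) best'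

def outerB (g : PySem.Dict String (List String)) :
    List String → PySem.Set String → List (List String) → List (List String)
  | [], _, chains => chains
  | node :: rest, visited, chains =>
    if PySem.Set.contains visited node then outerB g rest visited chains
    else
      let best := dfsB g 25 node [node] []
      outerB g rest (best.foldl (fun s w => PySem.Set.add s w) visited) (chains ++ [best])

def extract_chains_alt (graph : List (String × List String)) : List (List String) :=
  let g := PySem.Dict.ofList graph
  outerB g g.keys PySem.Set.empty []

-- ===== PRECONDITION & SPEC =====
-- Pre_ excludes graphs in which some listed neighbor is not a key of the dict: dereferencing
-- such a neighbor raises KeyError in both A and B; only a neighbor first reached at the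
-- depth cap 25 escapes dereference, and there both programs return the same value.
def Pre_extract_chains (graph : List (String × List String)) : Prop :=
  ∀ v ∈ (PySem.Dict.ofList graph).values, ∀ n ∈ v,
    (PySem.Dict.ofList graph).contains n = true
instance (graph : List (String × List String)) : Decidable (Pre_extract_chains graph) := by
  unfold Pre_extract_chains; infer_instance

def pvWitness_extract_chains : (List (String × List String)) :=
  [("a", ["b", "a"]), ("b", [])]

def Spec_extract_chains (graph : List (String × List String)) (out : List (List String)) : Prop := out = extract_chains_alt graph
instance (graph : List (String × List String)) (out : List (List String)) : Decidable (Spec_extract_chains graph out) := by unfold Spec_extract_chains; infer_instance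

-- ===== CLAIM (what is proved, stated in full; the proofs are below) =====
def Claim_equal_extract_chains : Prop := ∀ (graph : List (String × List String)), Dom_extract_chains graph → Pre_extract_chains graph → Spec_extract_chains graph (extract_chains graph)

-- ===== LEMMAS AND PROOFS =====

-- the neighbor loop: pushing the surviving neighbors of `path` and running the stack
-- equals folding B's dfs over them (ih = the induction hypothesis at fuel f)
theorem loopA_fold_aux (g : PySem.Dict String (List String)) (f : Nat) (path : List String)
    (ih : ∀ (curr : String) (path' best : List String) (stack : List (String × List String)),
        25 ≤ f + path'.length →
        loopA g ((curr, path') :: stack) best = loopA g stack (dfsB g f curr path' best))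
    (hf : 24 ≤ f + path.length) :
    ∀ (ms : List String) (stack : List (String × List String)) (best : List String),
      loopA g ((ms.filter (fun n => !path.contains n)).map (fun n => (n, path ++ [n])) ++ stack) best
      = loopA g stack (ms.foldl (fun b n => if path.contains n then b else dfsB g f n (path ++ [n]) b) best) := by
  intro ms
  induction ms with
  | nil => intro stack best; rfl
  | cons n ms ihm =>
    intro stack best
    by_cases hm : n ∈ path
    · simpa [List.filter_cons, hm] using ihm stack best
    · simp only [List.filter_cons, List.foldl_cons, List.contains_eq_mem,
        hm, decide_false, Bool.not_false, if_pos, if_false, decide_eq_true_eq,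
        List.map_cons, List.cons_append]
      rw [ih n (path ++ [n]) best _ (by simp; omega)]
      simpa using ihm stack _

-- popping one stack entry runs B's dfs on it and continues with the rest of the stack
theorem loopA_eq_dfsB (g : PySem.Dict String (List String)) (fuel : Nat) :
    ∀ (curr : String) (path best : List String) (stack : List (String × List String)),
      25 ≤ fuel + path.length →
      loopA g ((curr, path) :: stack) best = loopA g stack (dfsB g fuel curr path best) := by
  induction fuel with
  | zero =>
    intro curr path best stack h
    have hp : 25 ≤ path.length := by omega
    rw [loopA, dfsB]
    simp [hp]
  | succ f ih =>
    intro curr path best stack h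
    by_cases hp : 25 ≤ path.length
    · rw [loopA, dfsB]; simp [hp]
    · rw [loopA, dfsB]
      simp only [hp, if_false]
      have hrev : (((g.getD curr []).filter (fun n => !path.contains n)).map
          (fun n => (n, path ++ [n]))).reverse
          = ((g.getD curr []).reverse.filter (fun n => !path.contains n)).map
            (fun n => (n, path ++ [n])) := by
        rw [← List.map_reverse, List.filter_reverse]
      rw [hrev]
      exact loopA_fold_aux g f path ih (by omega) _ stack _

-- on each root the inner loop of A computes what B's dfs computes
theorem root_eq (g : PySem.Dict String (List String)) (node : String) :
    loopA g [(node, [node])] [] = dfsB g 25 node [node] [] := by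
  rw [loopA_eq_dfsB g 25 node [node] [] [] (by simp), loopA]

theorem outerA_eq_outerB (g : PySem.Dict String (List String)) :
    ∀ (keys : List String) (visited : PySem.Set String) (chains : List (List String)),
      outerA g keys visited chains = outerB g keys visited chains := by
  intro keys
  induction keys with
  | nil => intro visited chains; rfl
  | cons node rest ih =>
    intro visited chains
    rw [outerA, outerB]
    simp only [root_eq]
    split_ifs <;> exact ih _ _

-- ===== VERDICT (by name: the statement is the Claim_ definition above) =====
theorem extract_chains_spec : Claim_equal_extract_chains := by
  intro graph _ _
  unfold Spec_extract_chains extract_chains extract_chains_alt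
  exact outerA_eq_outerB _ _ _ _
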